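-- pv_equiv track=rewrite | github.com/zinee-u/algorithm_python | 백준/Gold/16935. 배열 돌리기 3/배열 돌리기 3.py | halfCw
-- ===== SOURCE A (Python) =====
-- def halfCw(arr):
--     n, m = len(arr), len(arr[0])
--     tmp = [[0] * m for _ in range(n)]
--     hr, hc = n//2, m//2
--     sr1, sc1 = 0, 0
--     sr2, sc2 = sr1, sc1+hc
--     sr3, sc3 = sr1+hr, sc1+hc
--     sr4, sc4 = sr1+hr, sc1
--     #4->1
--     for r in range(sr4, sr4+hr):
--         for c in range(sc4, sc4+hc):
--             tmp[r-hr][c] = arr[r][c]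
--     #1->2
--     for r in range(sr1, sr1+hr):
--         for c in range(sc1, sc1+hc):
--             tmp[r][c+hc] = arr[r][c]
--     #2->3
--     for r in range(sr2,sr2+hr):
--         for c in range(sc2,sc2+hc):
--             tmp[r+hr][c] = arr[r][c]
--     #3->4
--     for r in range(sr3, sr3+hr):
--         for c in range(sc3, sc3+hc):
--             tmp[r][c-hc] = arr[r][c]
--     return tmp
-- ===== SOURCE B (Python) =====
-- def halfCw(arr):
--     n, m = len(arr), len(arr[0])
--     hr, hc = n // 2, m // 2
--     pad = [0] * (m - 2 * hc)
--     out = [arr[r + hr][:hc] + arr[r][:hc] + pad for r in range(hr)]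
--     out += [arr[r][hc:2 * hc] + arr[r - hr][hc:2 * hc] + pad for r in range(hr, 2 * hr)]
--     out += [[0] * m for _ in range(n - 2 * hr)]
--     return out
-- ===== Notes on version B (the rewrite author's own statement) =====
-- stated objective: simpler
-- what changed: A allocates an n×m zero grid and runs four separate double loops writing single cells to move each quadrant; B builds the result directly by list slicing and concatenation (two quadrant slices plus zero padding per output row, zero rows appended for an odd dimension), replacing per-cell Python-level writes with bulk slice copies.
-- outside the precondition, e.g. on halfCw([]): A raises IndexError, B raises IndexError; on halfCw([[1, 2], [3]]): A raises IndexError, B returns [[3, 1], [2]]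
import Mathlib
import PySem

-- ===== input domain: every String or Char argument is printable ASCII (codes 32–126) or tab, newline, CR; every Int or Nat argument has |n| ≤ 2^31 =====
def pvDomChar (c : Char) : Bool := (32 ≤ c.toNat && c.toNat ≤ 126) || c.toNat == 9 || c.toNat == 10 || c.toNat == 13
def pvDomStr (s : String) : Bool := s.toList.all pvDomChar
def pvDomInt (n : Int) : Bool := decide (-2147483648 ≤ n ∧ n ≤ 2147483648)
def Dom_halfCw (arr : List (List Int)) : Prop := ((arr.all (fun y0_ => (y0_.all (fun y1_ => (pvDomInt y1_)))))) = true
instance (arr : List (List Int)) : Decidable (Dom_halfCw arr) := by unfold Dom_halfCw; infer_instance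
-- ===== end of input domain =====

-- B rebuilds the rotated grid by row slicing/concatenation (quadrant slices glued per row)
-- instead of A's four in-place block-copy write loops; objective: simpler.


-- ===== PORT A =====
-- arr[r][c] (in-range under Pre_)
def cellA (arr : List (List Int)) (r c : Int) : Int :=
  PySem.List.pyGetD (PySem.List.pyGetD arr r []) c 0
-- tmp[i][j] = v : replace element j of row i (indices in-range under Pre_)
def setCell (t : List (List Int)) (i j : Int) (v : Int) : List (List Int) :=
  PySem.List.pySetD t i (PySem.List.pySetD (PySem.List.pyGetD t i []) j v)

def halfCw (arr : List (List Int)) : List (List Int) :=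
  let n : Int := arr.length
  let m : Int := (PySem.List.pyGetD arr 0 ([] : List Int)).length
  let tmp : List (List Int) := List.replicate n.toNat (List.replicate m.toNat (0 : Int))
  let hr := PySem.Int.floordiv n 2
  let hc := PySem.Int.floordiv m 2
  let sr1 : Int := 0; let sc1 : Int := 0
  let sr2 := sr1;      let sc2 := sc1 + hc
  let sr3 := sr1 + hr; let sc3 := sc1 + hc
  let sr4 := sr1 + hr; let sc4 := sc1
  -- 4->1
  let tmp := (PySem.List.pyRange sr4 (sr4 + hr) 1).foldl (fun t r =>
    (PySem.List.pyRange sc4 (sc4 + hc) 1).foldl (fun t c =>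
      setCell t (r - hr) c (cellA arr r c)) t) tmp
  -- 1->2
  let tmp := (PySem.List.pyRange sr1 (sr1 + hr) 1).foldl (fun t r =>
    (PySem.List.pyRange sc1 (sc1 + hc) 1).foldl (fun t c =>
      setCell t r (c + hc) (cellA arr r c)) t) tmp
  -- 2->3
  let tmp := (PySem.List.pyRange sr2 (sr2 + hr) 1).foldl (fun t r =>
    (PySem.List.pyRange sc2 (sc2 + hc) 1).foldl (fun t c =>
      setCell t (r + hr) c (cellA arr r c)) t) tmp
  -- 3->4
  let tmp := (PySem.List.pyRange sr3 (sr3 + hr) 1).foldl (fun t r =>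
    (PySem.List.pyRange sc3 (sc3 + hc) 1).foldl (fun t c =>
      setCell t r (c - hc) (cellA arr r c)) t) tmp
  tmp

-- ===== PORT B =====
-- arr[r] (in-range under Pre_)
def rowB (arr : List (List Int)) (r : Int) : List Int :=
  PySem.List.pyGetD arr r []

def halfCw_alt (arr : List (List Int)) : List (List Int) :=
  let n : Int := arr.length
  let m : Int := (PySem.List.pyGetD arr 0 ([] : List Int)).length
  let hr := PySem.Int.floordiv n 2
  let hc := PySem.Int.floordiv m 2
  let pad : List Int := List.replicate (m - 2 * hc).toNat 0
  let out := (PySem.List.pyRange 0 hr 1).map (fun r =>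
    PySem.List.slice (rowB arr (r + hr)) none (some hc)
      ++ PySem.List.slice (rowB arr r) none (some hc) ++ pad)
  let out := out ++ (PySem.List.pyRange hr (2 * hr) 1).map (fun r =>
    PySem.List.slice (rowB arr r) (some hc) (some (2 * hc))
      ++ PySem.List.slice (rowB arr (r - hr)) (some hc) (some (2 * hc)) ++ pad)
  out ++ List.replicate (n - 2 * hr).toNat (List.replicate m.toNat (0 : Int))

-- ===== PRECONDITION & SPEC =====
-- Pre_ excludes exactly the inputs where A raises IndexError: the empty list (arr[0]) and
-- grids whose first 2*(n//2) rows are shorter than 2*(m//2) (the columns A reads).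
def Pre_halfCw (arr : List (List Int)) : Prop :=
  arr ≠ [] ∧ ∀ row ∈ arr.take (2 * (arr.length / 2)),
    2 * ((arr.headD []).length / 2) ≤ row.length
instance (arr : List (List Int)) : Decidable (Pre_halfCw arr) := by
  unfold Pre_halfCw; infer_instance
def pvWitness_halfCw : List (List Int) := [[1, 2], [3, 4]]

def Spec_halfCw (arr : List (List Int)) (out : List (List Int)) : Prop := out = halfCw_alt arr
instance (arr : List (List Int)) (out : List (List Int)) : Decidable (Spec_halfCw arr out) := by unfold Spec_halfCw; infer_instance

-- ===== CLAIM (what is proved, stated in full; the proofs are below) =====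
def Claim_equal_halfCw : Prop := ∀ (arr : List (List Int)), Dom_halfCw arr → Pre_halfCw arr → Spec_halfCw arr (halfCw arr)

-- ===== LEMMAS AND PROOFS =====
theorem gridGetD {α : Type} (n i : Nat) (F : Nat → α) (d : α) :
    ((List.range n).map F).getD i d = if i < n then F i else d := by
  by_cases h : i < n
  · simp [List.getD, h]
  · have h' : n ≤ i := by omega
    rw [List.getD_eq_getElem?_getD, List.getElem?_eq_none (by simpa using h')]
    simp [h]

theorem gridSet {α : Type} (n i : Nat) (F : Nat → α) (v : α) (_h : i < n) :
    ((List.range n).map F).set i v = (List.range n).map (fun k => if k = i then v else F k) := by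
  apply List.ext_getElem
  · simp
  · intro k h1 h2
    simp only [List.getElem_set, List.getElem_map, List.getElem_range]
    by_cases hk : k = i
    · simp [hk]
    · have : ¬ i = k := fun h' => hk h'.symm
      simp [hk, this]

theorem foldl_set_grid {α : Type} (off h n : Nat) (F : Nat → α) (upd : Nat → α → α) (d : α)
    (hh : off + h ≤ n) :
    (List.range h).foldl (fun t k => t.set (off + k) (upd k (t.getD (off + k) d)))
      ((List.range n).map F)
    = (List.range n).map (fun i => if off ≤ i ∧ i < off + h then upd (i - off) (F i) else F i) := by
  induction h with
  | zero =>
    simp only [List.range_zero, List.foldl_nil]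
    apply List.map_congr_left
    intro i hi
    have h0 : ¬ (off ≤ i ∧ i < off + 0) := by omega
    simp only [h0, if_false]
  | succ h ih =>
    rw [List.range_succ, List.foldl_append]
    rw [ih (by omega)]
    simp only [List.foldl_cons, List.foldl_nil]
    rw [gridGetD, gridSet _ _ _ _ (by omega)]
    apply List.map_congr_left
    intro i hi
    simp only [List.mem_range] at hi
    by_cases he : i = off + h
    · have h1 : off + h < n := by omega
      have h2 : ¬ (off ≤ off + h ∧ off + h < off + h) := by omega
      have h3 : off ≤ off + h ∧ off + h < off + (h+1) := by omega
      simp [he, h1, h3]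
    · by_cases hin : off ≤ i ∧ i < off + h
      · have h3 : off ≤ i ∧ i < off + (h+1) := by omega
        simp [he, hin, h3]
      · have h3 : ¬ (off ≤ i ∧ i < off + (h+1)) := by omega
        simp [he, hin, h3]
-- row-level variant: the written value ignores the old entry
theorem foldl_set_grid' {α : Type} (soff w M : Nat) (G : Nat → α) (v : Nat → α) (d : α)
    (hM : soff + w ≤ M) :
    (List.range w).foldl (fun row c => row.set (soff + c) (v c)) ((List.range M).map G)
    = (List.range M).map (fun j => if soff ≤ j ∧ j < soff + w then v (j - soff) else G j) :=
  foldl_set_grid soff w M G (fun c _ => v c) d hM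

-- inner-loop lift: writing repeatedly into row i equals setting row i once
theorem innerLift (cs : List Nat) (i : Nat) (t : List (List Int))
    (j : Nat → Nat) (v : Nat → Int) (hi : i < t.length) :
    cs.foldl (fun t c => setCell t (i : Int) ((j c : Nat) : Int) (v c)) t
    = t.set i (cs.foldl (fun row c => row.set (j c) (v c)) (t.getD i [])) := by
  induction cs generalizing t with
  | nil =>
    simp only [List.foldl_nil]
    rw [List.getD_eq_getElem?_getD, List.getElem?_eq_getElem hi]
    simp
  | cons c cs ih =>
    simp only [List.foldl_cons]
    have hb : setCell t (i : Int) ((j c : Nat) : Int) (v c)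
        = t.set i ((t.getD i []).set (j c) (v c)) := by
      simp [setCell]
    rw [hb, ih _ (by simpa using hi)]
    rw [List.set_set]
    congr 1
    simp [List.getD_eq_getElem?_getD, List.getElem?_set_self (by simpa using hi),
      List.getElem?_eq_getElem hi]

-- one of A's block-copy double loops, on a grid in map-normal form
theorem loopStep (N M off h soff w : Nat) (F : Nat → Nat → Int) (val : Nat → Nat → Int)
    (hN : off + h ≤ N) (hM : soff + w ≤ M) :
    (List.range h).foldl (fun t k =>
        (List.range w).foldl (fun t c =>
          setCell t ((off + k : Nat) : Int) ((soff + c : Nat) : Int) (val k c)) t)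
      ((List.range N).map (fun i => (List.range M).map (F i)))
    = (List.range N).map (fun i => (List.range M).map (fun j =>
        if off ≤ i ∧ i < off + h ∧ soff ≤ j ∧ j < soff + w
        then val (i - off) (j - soff) else F i j)) := by
  induction h with
  | zero =>
    simp only [List.range_zero, List.foldl_nil]
    apply List.map_congr_left
    intro i hi
    have h0 : ∀ j : Nat, ¬ (off ≤ i ∧ i < off + 0 ∧ soff ≤ j ∧ j < soff + w) := by omega
    simp only [h0, if_false]
  | succ h ih =>
    rw [List.range_succ, List.foldl_append, ih (by omega)]
    simp only [List.foldl_cons, List.foldl_nil]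
    rw [innerLift (List.range w) (off + h) _ (fun c => soff + c) (val h) (by simp; omega)]
    rw [gridGetD, gridSet _ _ _ _ (by omega)]
    have hrow := foldl_set_grid' soff w M
      (fun j => if off ≤ off + h ∧ off + h < off + h ∧ soff ≤ j ∧ j < soff + w
                then val (off + h - off) (j - soff) else F (off + h) j)
      (val h) (0 : Int) hM
    have hlt : off + h < N := by omega
    simp only [hlt, if_true]
    rw [hrow]
    apply List.map_congr_left
    intro i hi
    simp only [List.mem_range] at hi
    by_cases he : i = off + h
    · subst he
      rw [if_pos rfl]
      apply List.map_congr_left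
      intro j hj
      by_cases hjin : soff ≤ j ∧ j < soff + w
      · have h1 : off ≤ off + h ∧ off + h < off + (h+1) ∧ soff ≤ j ∧ j < soff + w := by omega
        simp [hjin, h1]
      · have h1 : ¬ (off ≤ off + h ∧ off + h < off + (h+1) ∧ soff ≤ j ∧ j < soff + w) := by omega
        have h2 : ¬ (off ≤ off + h ∧ off + h < off + h ∧ soff ≤ j ∧ j < soff + w) := by omega
        simp [hjin]
    · simp only [he, if_false]
      apply List.map_congr_left
      intro j hj
      by_cases hin : off ≤ i ∧ i < off + h ∧ soff ≤ j ∧ j < soff + w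
      · have h1 : off ≤ i ∧ i < off + (h+1) ∧ soff ≤ j ∧ j < soff + w := by omega
        simp [hin, h1]
      · have h1 : ¬ (off ≤ i ∧ i < off + (h+1) ∧ soff ≤ j ∧ j < soff + w) := by omega
        simp [hin, h1]
-- pyRange double loop → Nat range double loop
theorem pyNested (a h b w : Nat) (lo hi lo2 hi2 : Int)
    (e1 : lo = (a : Int)) (e2 : hi = (a : Int) + (h : Int))
    (e3 : lo2 = (b : Int)) (e4 : hi2 = (b : Int) + (w : Int))
    (body : List (List Int) → Int → Int → List (List Int)) (t0 : List (List Int)) :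
    (PySem.List.pyRange lo hi 1).foldl (fun t r =>
        (PySem.List.pyRange lo2 hi2 1).foldl (fun t c => body t r c) t) t0
    = (List.range h).foldl (fun (t : List (List Int)) (k : Nat) =>
        (List.range w).foldl (fun (t : List (List Int)) (c : Nat) =>
          body t ((a : Int) + (k : Int)) ((b : Int) + (c : Int))) t) t0 := by
  subst e1 e2 e3 e4
  have pyr : ∀ (x y : Nat), PySem.List.pyRange (x : Int) ((x : Int) + (y : Int)) 1
      = (List.range y).map (fun k : Nat => (x : Int) + (k : Int)) := by
    intro x y
    rw [PySem.List.pyRange_one]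
    have hxy : ((x : Int) + (y : Int) - (x : Int)).toNat = y := by omega
    rw [hxy]
  simp only [pyr, List.foldl_map]

-- the common right-hand shape: cell (i,j) of the rotated grid
def fB (arr : List (List Int)) (Hr Hc : Nat) (i j : Nat) : Int :=
  if i < Hr then
    if j < Hc then (arr.getD (Hr + i) []).getD j 0
    else if j < 2 * Hc then (arr.getD i []).getD (j - Hc) 0
    else 0
  else if i < 2 * Hr then
    if j < Hc then (arr.getD i []).getD (Hc + j) 0
    else if j < 2 * Hc then (arr.getD (i - Hr) []).getD j 0
    else 0
  else 0

theorem A_char (arr : List (List Int)) :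
    halfCw arr = (List.range arr.length).map (fun i =>
      (List.range (PySem.List.pyGetD arr 0 []).length).map
        (fB arr (arr.length / 2) ((PySem.List.pyGetD arr 0 []).length / 2) i)) := by
  have hhr : PySem.Int.floordiv ((arr.length : Nat) : Int) 2 = ((arr.length / 2 : Nat) : Int) := by
    exact_mod_cast PySem.Int.floordiv_natCast arr.length 2
  have hhc : PySem.Int.floordiv (((PySem.List.pyGetD arr 0 []).length : Nat) : Int) 2
      = (((PySem.List.pyGetD arr 0 []).length / 2 : Nat) : Int) := by
    exact_mod_cast PySem.Int.floordiv_natCast (PySem.List.pyGetD arr 0 []).length 2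
  have cellA_cast : ∀ x y : Nat, cellA arr (x : Int) (y : Int) = (arr.getD x []).getD y 0 := by
    intro x y; simp [cellA]
  have h2r : (arr.length / 2) + (arr.length / 2) ≤ arr.length := by omega
  have h2c : ((PySem.List.pyGetD arr 0 []).length / 2) + ((PySem.List.pyGetD arr 0 []).length / 2)
      ≤ (PySem.List.pyGetD arr 0 []).length := by omega
  simp only [halfCw]
  simp only [hhr, hhc, zero_add, Int.toNat_natCast]
  rw [pyNested (arr.length / 2) (arr.length / 2) 0 ((PySem.List.pyGetD arr 0 []).length / 2)
        ((arr.length / 2 : Nat) : Int) (((arr.length / 2 : Nat) : Int) + ((arr.length / 2 : Nat) : Int))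
        (0 : Int) (((PySem.List.pyGetD arr 0 []).length / 2 : Nat) : Int)
        rfl rfl (by simp) (by simp)]
  rw [pyNested 0 (arr.length / 2) 0 ((PySem.List.pyGetD arr 0 []).length / 2)
        (0 : Int) ((arr.length / 2 : Nat) : Int)
        (0 : Int) (((PySem.List.pyGetD arr 0 []).length / 2 : Nat) : Int)
        (by simp) (by simp) (by simp) (by simp)]
  rw [pyNested 0 (arr.length / 2) ((PySem.List.pyGetD arr 0 []).length / 2)
        ((PySem.List.pyGetD arr 0 []).length / 2)
        (0 : Int) ((arr.length / 2 : Nat) : Int)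
        (((PySem.List.pyGetD arr 0 []).length / 2 : Nat) : Int)
        ((((PySem.List.pyGetD arr 0 []).length / 2 : Nat) : Int) + (((PySem.List.pyGetD arr 0 []).length / 2 : Nat) : Int))
        (by simp) (by simp) rfl rfl]
  rw [pyNested (arr.length / 2) (arr.length / 2) ((PySem.List.pyGetD arr 0 []).length / 2)
        ((PySem.List.pyGetD arr 0 []).length / 2)
        ((arr.length / 2 : Nat) : Int) (((arr.length / 2 : Nat) : Int) + ((arr.length / 2 : Nat) : Int))
        (((PySem.List.pyGetD arr 0 []).length / 2 : Nat) : Int)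
        ((((PySem.List.pyGetD arr 0 []).length / 2 : Nat) : Int) + (((PySem.List.pyGetD arr 0 []).length / 2 : Nat) : Int))
        rfl rfl rfl rfl]
  have r1 : ∀ x : Nat, ((0 : Nat) : Int) + (x : Int) = ((0 + x : Nat) : Int) := by intro x; omega
  have r2 : ∀ x : Nat, ((arr.length / 2 : Nat) : Int) + (x : Int) = ((arr.length / 2 + x : Nat) : Int) := by
    intro x; omega
  have r3 : ∀ x : Nat, (((PySem.List.pyGetD arr 0 []).length / 2 : Nat) : Int) + (x : Int)
      = (((PySem.List.pyGetD arr 0 []).length / 2 + x : Nat) : Int) := by intro x; omega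
  have r4 : ∀ x : Nat, ((arr.length / 2 + x : Nat) : Int) - ((arr.length / 2 : Nat) : Int)
      = ((0 + x : Nat) : Int) := by intro x; omega
  have r5 : ∀ x : Nat, (((PySem.List.pyGetD arr 0 []).length / 2 + x : Nat) : Int)
      - (((PySem.List.pyGetD arr 0 []).length / 2 : Nat) : Int) = ((0 + x : Nat) : Int) := by intro x; omega
  have r6 : ∀ x : Nat, ((0 + x : Nat) : Int) + (((PySem.List.pyGetD arr 0 []).length / 2 : Nat) : Int)
      = (((PySem.List.pyGetD arr 0 []).length / 2 + x : Nat) : Int) := by intro x; omega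
  have r7 : ∀ x : Nat, ((0 + x : Nat) : Int) + ((arr.length / 2 : Nat) : Int)
      = ((arr.length / 2 + x : Nat) : Int) := by intro x; omega
  simp only [r1, r2, r3, r4, r5, r6, r7]
  have hrep : List.replicate arr.length (List.replicate (PySem.List.pyGetD arr 0 []).length (0 : Int))
      = (List.range arr.length).map (fun _ => (List.range (PySem.List.pyGetD arr 0 []).length).map
          (fun _ => (0 : Int))) := by
    rw [List.map_const', List.map_const', List.length_range, List.length_range]
  rw [hrep]
  rw [loopStep arr.length (PySem.List.pyGetD arr 0 []).length 0 (arr.length / 2)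
        0 ((PySem.List.pyGetD arr 0 []).length / 2) _ _ (by omega) (by omega)]
  rw [loopStep arr.length (PySem.List.pyGetD arr 0 []).length 0 (arr.length / 2)
        ((PySem.List.pyGetD arr 0 []).length / 2) ((PySem.List.pyGetD arr 0 []).length / 2)
        _ _ (by omega) (by omega)]
  rw [loopStep arr.length (PySem.List.pyGetD arr 0 []).length (arr.length / 2) (arr.length / 2)
        ((PySem.List.pyGetD arr 0 []).length / 2) ((PySem.List.pyGetD arr 0 []).length / 2)
        _ _ (by omega) (by omega)]
  rw [loopStep arr.length (PySem.List.pyGetD arr 0 []).length (arr.length / 2) (arr.length / 2)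
        0 ((PySem.List.pyGetD arr 0 []).length / 2) _ _ (by omega) (by omega)]
  apply List.map_congr_left
  intro i hi
  apply List.map_congr_left
  intro j hj
  simp only [List.mem_range] at hi hj
  simp only [cellA_cast, fB]
  split_ifs <;>
    first
      | rfl
      | omega
      | (congr 1 <;> omega)
      | (congr 2 <;> omega)
theorem getD_drop' (l : List Int) (n m : Nat) (d : Int) :
    (l.drop n).getD m d = l.getD (n + m) d := by
  simp [List.getD_eq_getElem?_getD]

theorem row_decomp (u v : List Int) (Hc M : Nat) (hu : Hc ≤ u.length) (hv : Hc ≤ v.length)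
    (hm : 2 * Hc ≤ M) :
    u.take Hc ++ v.take Hc ++ List.replicate (M - 2 * Hc) (0 : Int)
    = (List.range M).map (fun j =>
        if j < Hc then u.getD j 0 else if j < 2 * Hc then v.getD (j - Hc) 0 else 0) := by
  apply List.ext_getElem
  · simp; omega
  · intro j h1 h2
    simp only [List.getElem_map, List.getElem_range]
    by_cases hj1 : j < Hc
    · rw [List.getElem_append_left (by simp; omega)]
      rw [List.getElem_append_left (by simp; omega)]
      simp [List.getD_eq_getElem?_getD, hj1, List.getElem?_eq_getElem (by omega : j < u.length)]
    · by_cases hj2 : j < 2 * Hc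
      · rw [List.getElem_append_left (by simp; omega)]
        rw [List.getElem_append_right (by simp; omega)]
        have hlen : (u.take Hc).length = Hc := by simp; omega
        simp only [hlen]
        rw [List.getElem_take]
        simp only [hj1, if_false, hj2, if_true]
        rw [List.getD_eq_getElem?_getD, List.getElem?_eq_getElem (by omega : j - Hc < v.length)]
        simp
      · rw [List.getElem_append_right (by simp; omega)]
        simp [hj1, hj2]
theorem pyr0 (y : Nat) :
    PySem.List.pyRange 0 (y : Int) 1 = (List.range y).map (fun k : Nat => (k : Int)) := by
  rw [PySem.List.pyRange_one]
  simp

theorem pyrAdd (x y : Nat) :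
    PySem.List.pyRange (x : Int) ((x : Int) + (y : Int)) 1
    = (List.range y).map (fun k : Nat => (x : Int) + (k : Int)) := by
  rw [PySem.List.pyRange_one]
  have h : ((x : Int) + (y : Int) - (x : Int)).toNat = y := by omega
  rw [h]

theorem B_char (arr : List (List Int))
    (hrows : ∀ x, x < 2 * (arr.length / 2) →
      2 * ((PySem.List.pyGetD arr 0 []).length / 2) ≤ (arr.getD x []).length) :
    halfCw_alt arr = (List.range arr.length).map (fun i =>
      (List.range (PySem.List.pyGetD arr 0 []).length).map
        (fB arr (arr.length / 2) ((PySem.List.pyGetD arr 0 []).length / 2) i)) := by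
  have hhr : PySem.Int.floordiv ((arr.length : Nat) : Int) 2 = ((arr.length / 2 : Nat) : Int) := by
    exact_mod_cast PySem.Int.floordiv_natCast arr.length 2
  have hhc : PySem.Int.floordiv (((PySem.List.pyGetD arr 0 []).length : Nat) : Int) 2
      = (((PySem.List.pyGetD arr 0 []).length / 2 : Nat) : Int) := by
    exact_mod_cast PySem.Int.floordiv_natCast (PySem.List.pyGetD arr 0 []).length 2
  have rowB_cast : ∀ x : Nat, rowB arr (x : Int) = arr.getD x [] := by
    intro x; simp [rowB]
  simp only [halfCw_alt]
  simp only [hhr, hhc]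
  have e2r : (2 : Int) * ((arr.length / 2 : Nat) : Int)
      = ((arr.length / 2 : Nat) : Int) + ((arr.length / 2 : Nat) : Int) := by ring
  have e2c : (2 : Int) * (((PySem.List.pyGetD arr 0 []).length / 2 : Nat) : Int)
      = ((2 * ((PySem.List.pyGetD arr 0 []).length / 2) : Nat) : Int) := by push_cast; ring
  rw [e2r, e2c]
  rw [pyr0, pyrAdd]
  simp only [List.map_map]
  simp only [Function.comp_def]
  have s1 : ∀ k : Nat, (k : Int) + ((arr.length / 2 : Nat) : Int)
      = ((arr.length / 2 + k : Nat) : Int) := by intro k; omega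
  have s2 : ∀ k : Nat, ((arr.length / 2 : Nat) : Int) + (k : Int)
      = ((arr.length / 2 + k : Nat) : Int) := by intro k; omega
  have s3 : ∀ k : Nat, ((arr.length / 2 + k : Nat) : Int) - ((arr.length / 2 : Nat) : Int)
      = (k : Int) := by intro k; omega
  simp only [s1, s2, s3, rowB_cast]
  simp only [PySem.List.slice_to_natCast, PySem.List.slice_natCast]
  have eHc : 2 * ((PySem.List.pyGetD arr 0 []).length / 2)
        - (PySem.List.pyGetD arr 0 []).length / 2 = (PySem.List.pyGetD arr 0 []).length / 2 := by
    omega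
  rw [eHc]
  have ePad : (((PySem.List.pyGetD arr 0 []).length : Int)
      - ((2 * ((PySem.List.pyGetD arr 0 []).length / 2) : Nat) : Int)).toNat
      = (PySem.List.pyGetD arr 0 []).length - 2 * ((PySem.List.pyGetD arr 0 []).length / 2) := by
    omega
  have eRows : ((arr.length : Int) - ((arr.length / 2 + arr.length / 2 : Nat) : Int)).toNat
      = arr.length - 2 * (arr.length / 2) := by omega
  rw [ePad, eRows, Int.toNat_natCast]
  set Hc := (PySem.List.pyGetD arr 0 []).length / 2 with hHc'
  set Hr := arr.length / 2 with hHr'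
  set M := (PySem.List.pyGetD arr 0 []).length with hM'
  set N := arr.length with hN'
  conv_rhs =>
    rw [show N = Hr + (Hr + (N - 2 * Hr)) from by omega]
    rw [List.range_add, List.map_append, List.map_map]
    rw [List.range_add, List.map_append, List.map_map]
    rw [← List.append_assoc]
  simp only [Function.comp_def]
  congr 1
  · congr 1
    · -- top block
      apply List.map_congr_left
      intro k hk
      simp only [List.mem_range] at hk
      have hu := hrows (Hr + k) (by omega)
      have hv := hrows k (by omega)
      rw [row_decomp _ _ _ M (by omega) (by omega) (by omega)]
      apply List.map_congr_left
      intro j hj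
      simp only [fB, hk, if_true]
    · -- bottom block
      apply List.map_congr_left
      intro k hk
      simp only [List.mem_range] at hk
      have hu := hrows (Hr + k) (by omega)
      have hv := hrows k (by omega)
      rw [row_decomp _ _ _ M (by rw [List.length_drop]; omega)
            (by rw [List.length_drop]; omega) (by omega)]
      apply List.map_congr_left
      intro j hj
      simp only [List.mem_range] at hj
      simp only [fB, getD_drop']
      have hc1 : ¬ (Hr + k < Hr) := by omega
      have hc2 : Hr + k < 2 * Hr := by omega
      simp only [hc1, if_false, hc2, if_true]
      split_ifs <;>
        first
          | rfl
          | omega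
          | (congr 1 <;> omega)
          | (congr 2 <;> omega)
  · -- zero block
    apply List.ext_getElem
    · simp
    · intro k h1 h2
      simp only [List.getElem_replicate, List.getElem_map, List.getElem_range]
      simp only [List.length_replicate] at h1
      have hc1 : ¬ (Hr + (Hr + k) < Hr) := by omega
      have hc2 : ¬ (Hr + (Hr + k) < 2 * Hr) := by omega
      rw [show (fB arr Hr Hc (Hr + (Hr + k))) = fun _ => (0 : Int) from by
        funext j; simp [fB, hc1, hc2]]
      simp [List.map_const']

theorem pre_bridge (arr : List (List Int)) (hne : arr ≠ [])
    (htake : ∀ row ∈ arr.take (2 * (arr.length / 2)),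
      2 * ((arr.headD []).length / 2) ≤ row.length) :
    ∀ x, x < 2 * (arr.length / 2) →
      2 * ((PySem.List.pyGetD arr 0 []).length / 2) ≤ (arr.getD x []).length := by
  have hhead : arr.headD [] = PySem.List.pyGetD arr 0 [] := by
    cases arr with
    | nil => exact absurd rfl hne
    | cons a t => simp [PySem.List.pyGetD_zero_cons]
  intro x hx
  have hx2 : x < arr.length := by omega
  have hmem : arr[x] ∈ arr.take (2 * (arr.length / 2)) := by
    have hx3 : x < (arr.take (2 * (arr.length / 2))).length := by simp; omega
    have := List.getElem_mem hx3
    rwa [List.getElem_take] at this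
  have hlen := htake _ hmem
  rw [hhead] at hlen
  rw [List.getD_eq_getElem?_getD, List.getElem?_eq_getElem hx2]
  exact hlen

-- ===== VERDICT (by name: the statement is the Claim_ definition above) =====
theorem halfCw_spec : Claim_equal_halfCw := by
  unfold Claim_equal_halfCw
  intro arr _ hpre
  unfold Spec_halfCw
  obtain ⟨hne, htake⟩ := hpre
  rw [A_char, B_char arr (pre_bridge arr hne htake)]
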